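-- pv_equiv track=rewrite | github.com/andbar27/esercizi | lezione26/lezione26.py | decombinazione
-- ===== SOURCE A (Python) =====
-- def decombinazione(testoCifrato: str) -> str:
--     lenght = len(testoCifrato)
--
--     first_half = ""
--     second_half = ""
--     for i in range(lenght):
--
--         if i % 2:   #even
--             second_half += testoCifrato[i]
--
--         else:
--             first_half += testoCifrato[i]
--
--     return first_half + second_half
-- ===== SOURCE B (Python) =====
-- def decombinazione(testoCifrato: str) -> str:
--     return testoCifrato[::2] + testoCifrato[1::2]
-- ===== Notes on version B (the rewrite author's own statement) =====
-- stated objective: idiomatic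
-- what changed: Replaces the index loop with an i%2 branch building two string accumulators by two strided slices (t[::2] and t[1::2]) concatenated, removing the explicit loop and parity test entirely.
import Mathlib
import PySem

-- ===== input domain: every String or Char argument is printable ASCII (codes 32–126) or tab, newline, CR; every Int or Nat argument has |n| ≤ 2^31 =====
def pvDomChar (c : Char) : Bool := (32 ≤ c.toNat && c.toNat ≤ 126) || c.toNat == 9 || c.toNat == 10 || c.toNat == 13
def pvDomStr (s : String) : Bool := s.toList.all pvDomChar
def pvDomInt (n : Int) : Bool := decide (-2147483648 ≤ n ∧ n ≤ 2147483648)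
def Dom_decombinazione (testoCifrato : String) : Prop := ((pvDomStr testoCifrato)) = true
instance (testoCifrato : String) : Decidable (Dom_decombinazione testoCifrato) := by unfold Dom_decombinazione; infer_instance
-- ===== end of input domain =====

-- B replaces A's index loop with an i%2 branch by two strided slices t[::2] ++ t[1::2] (idiomatic).

-- ===== PORT A =====
-- A's loop over range(len) with two string accumulators; strings are ported on the
-- char-list side (PySem convention), s[i] is pyGetD (always in range here).
def decombinazione (testoCifrato : String) : String :=
  let lenght : Int := PySem.Str.len testoCifrato
  let cs : List Char := testoCifrato.toList
  let p := (PySem.List.pyRange 0 lenght 1).foldl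
    (fun (acc : List Char × List Char) i =>
      if PySem.Int.mod i 2 ≠ 0 then
        (acc.1, acc.2 ++ [PySem.List.pyGetD cs i ' '])
      else
        (acc.1 ++ [PySem.List.pyGetD cs i ' '], acc.2))
    ([], [])
  String.ofList (p.1 ++ p.2)

-- ===== PORT B =====
-- t[::2] and t[1::2] are PySem.List.slice? with step 2; the step is the literal 2 ≠ 0,
-- so slice? always returns some and the getD default is unreachable.
def decombinazione_alt (testoCifrato : String) : String :=
  String.ofList
    ((PySem.List.slice? testoCifrato.toList none none 2).getD []
      ++ (PySem.List.slice? testoCifrato.toList (some 1) none 2).getD [])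

-- ===== PRECONDITION & SPEC =====
def Spec_decombinazione (testoCifrato : String) (out : String) : Prop := out = decombinazione_alt testoCifrato
instance (testoCifrato : String) (out : String) : Decidable (Spec_decombinazione testoCifrato out) := by unfold Spec_decombinazione; infer_instance

-- ===== CLAIM (what is proved, stated in full; the proofs are below) =====
def Claim_equal_decombinazione : Prop := ∀ (testoCifrato : String), Dom_decombinazione testoCifrato → Spec_decombinazione testoCifrato (decombinazione testoCifrato)

-- ===== LEMMAS AND PROOFS =====

-- even-indexed characters of a char list
def pvEvens : List Char → List Char
  | [] => []
  | [a] => [a]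
  | a :: _ :: r => a :: pvEvens r

-- odd-indexed characters of a char list
def pvOdds : List Char → List Char
  | [] => []
  | [_] => []
  | _ :: b :: r => b :: pvOdds r

lemma pvEvens_append (l : List Char) (c : Char) :
    pvEvens (l ++ [c]) = if l.length % 2 = 0 then pvEvens l ++ [c] else pvEvens l := by
  induction l using pvEvens.induct with
  | case1 => simp [pvEvens]
  | case2 a => simp [pvEvens]
  | case3 a b r ih => simp [pvEvens, ih]; split_ifs <;> simp_all <;> omega

lemma pvOdds_append (l : List Char) (c : Char) :
    pvOdds (l ++ [c]) = if l.length % 2 = 0 then pvOdds l else pvOdds l ++ [c] := by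
  induction l using pvOdds.induct with
  | case1 => simp [pvOdds]
  | case2 a => simp [pvOdds]
  | case3 a b r ih => simp [pvOdds, ih]; split_ifs <;> simp_all <;> omega

lemma filterMap_even (xs : List Char) :
    List.filterMap (fun k => xs[2 * k]?) (List.range ((xs.length + 1) / 2)) = pvEvens xs := by
  induction xs using pvEvens.induct with
  | case1 => simp [pvEvens]
  | case2 a => simp [pvEvens]
  | case3 a b r ih =>
      have hlen : ((a :: b :: r).length + 1) / 2 = (r.length + 1) / 2 + 1 := by
        simp; omega
      rw [hlen, List.range_succ_eq_map, List.filterMap_cons, List.filterMap_map]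
      have hfun : List.filterMap ((fun k => (a :: b :: r)[2 * k]?) ∘ (· + 1)) (List.range ((r.length + 1) / 2))
          = List.filterMap (fun k => r[2 * k]?) (List.range ((r.length + 1) / 2)) := by
        apply List.filterMap_congr
        intro k _
        have h2 : 2 * (k + 1) = 2 * k + 1 + 1 := by omega
        simp [Function.comp, h2]
      rw [hfun, ih]
      simp [pvEvens]

lemma filterMap_odd (xs : List Char) :
    List.filterMap (fun k => xs[2 * k + 1]?) (List.range (xs.length / 2)) = pvOdds xs := by
  induction xs using pvOdds.induct with
  | case1 => simp [pvOdds]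
  | case2 a => simp [pvOdds]
  | case3 a b r ih =>
      have hlen : (a :: b :: r).length / 2 = r.length / 2 + 1 := by simp; omega
      rw [hlen, List.range_succ_eq_map, List.filterMap_cons, List.filterMap_map]
      have hfun : List.filterMap ((fun k => (a :: b :: r)[2 * k + 1]?) ∘ (· + 1)) (List.range (r.length / 2))
          = List.filterMap (fun k => r[2 * k + 1]?) (List.range (r.length / 2)) := by
        apply List.filterMap_congr
        intro k _
        have h2 : 2 * (k + 1) + 1 = 2 * k + 1 + 1 + 1 := by omega
        simp [Function.comp, h2]
      rw [hfun, ih]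
      simp [pvOdds]

lemma slice?_two_even (xs : List Char) :
    PySem.List.slice? xs none none 2 = some (pvEvens xs) := by
  rw [← filterMap_even]
  unfold PySem.List.slice? PySem.List.sliceIndices
  norm_num
  have h1 : (if 0 < xs.length then (((xs.length : Int) + 2 - 1) / 2).toNat else 0) = (xs.length + 1) / 2 := by
    split_ifs <;> omega
  rw [h1]
  apply List.filterMap_congr
  intro k _
  have h2 : ((2 * (k : Int)).toNat) = 2 * k := by omega
  rw [h2]

lemma slice?_two_odd (xs : List Char) :
    PySem.List.slice? xs (some 1) none 2 = some (pvOdds xs) := by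
  rw [← filterMap_odd]
  unfold PySem.List.slice? PySem.List.sliceIndices
  norm_num
  rcases Nat.eq_zero_or_pos xs.length with h0 | hpos
  · simp [h0]
  · have hmin : min 1 (xs.length : Int) = 1 := by omega
    rw [hmin]
    have h1 : (if 1 < xs.length then (((xs.length : Int) - 1 + 2 - 1) / 2).toNat else 0) = xs.length / 2 := by
      split_ifs <;> omega
    rw [h1]
    apply List.filterMap_congr
    intro k _
    have h2 : ((1 + 2 * (k : Int)).toNat) = 2 * k + 1 := by omega
    rw [h2]

lemma loopA (xs : List Char) :
    (PySem.List.pyRange 0 (xs.length : Int) 1).foldl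
      (fun (acc : List Char × List Char) i =>
        if PySem.Int.mod i 2 ≠ 0 then
          (acc.1, acc.2 ++ [PySem.List.pyGetD xs i ' '])
        else
          (acc.1 ++ [PySem.List.pyGetD xs i ' '], acc.2))
      ([], []) = (pvEvens xs, pvOdds xs) := by
  induction xs using List.reverseRecOn with
  | nil => simp [PySem.List.pyRange_one_eq_nil, pvEvens, pvOdds]
  | append_singleton ys c ih =>
    have hn : (((ys ++ [c]).length : Int)) = (ys.length : Int) + 1 := by simp
    rw [hn, PySem.List.pyRange_one_succ_right (by exact_mod_cast Int.natCast_nonneg ys.length),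
        List.foldl_append]
    have hcong :
        (PySem.List.pyRange 0 (ys.length : Int) 1).foldl
          (fun (acc : List Char × List Char) i =>
            if PySem.Int.mod i 2 ≠ 0 then
              (acc.1, acc.2 ++ [PySem.List.pyGetD (ys ++ [c]) i ' '])
            else
              (acc.1 ++ [PySem.List.pyGetD (ys ++ [c]) i ' '], acc.2))
          ([], [])
        = (PySem.List.pyRange 0 (ys.length : Int) 1).foldl
          (fun (acc : List Char × List Char) i =>
            if PySem.Int.mod i 2 ≠ 0 then
              (acc.1, acc.2 ++ [PySem.List.pyGetD ys i ' '])
            else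
              (acc.1 ++ [PySem.List.pyGetD ys i ' '], acc.2))
          ([], []) := by
      apply PySem.List.foldl_congr_mem
      intro acc i hi
      rw [PySem.List.mem_pyRange_one] at hi
      have hget : PySem.List.pyGetD (ys ++ [c]) i ' ' = PySem.List.pyGetD ys i ' ' := by
        rw [PySem.List.pyGetD_eq_getElem _ _ hi.1 (by simp; omega),
            PySem.List.pyGetD_eq_getElem _ _ hi.1 (by omega)]
        exact List.getElem_append_left (by omega)
      rw [hget]
    rw [hcong, ih]
    simp only [List.foldl_cons, List.foldl_nil]
    have hgetc : PySem.List.pyGetD (ys ++ [c]) ((ys.length : Int)) ' ' = c := by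
      rw [PySem.List.pyGetD_eq_getElem _ _ (by positivity) (by simp)]
      simp
    rw [hgetc, pvEvens_append, pvOdds_append]
    by_cases hp : ys.length % 2 = 0
    · simp [hp]
      omega
    · simp [hp]
      omega

-- ===== VERDICT (by name: the statement is the Claim_ definition above) =====
theorem decombinazione_spec : Claim_equal_decombinazione := by
  intro s _
  unfold Spec_decombinazione decombinazione decombinazione_alt
  rw [slice?_two_even, slice?_two_odd]
  simp only [Option.getD_some]
  have h := loopA s.toList
  simp only [PySem.Str.len_eq] at *
  rw [h]
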